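-- pv_equiv track=rewrite | github.com/wmaxlloyd/9dt-e2e-test-framework | src/utils/game_scenario_utilities.py | generate_draw_game
-- ===== SOURCE A (Python) =====
-- from typing import List, TYPE_CHECKING
--
-- def generate_draw_game(game_board_height: int, game_board_width: int) -> List[int]:
-- 	"""
-- 	Generates draw game based on the following algorithm:
-- 	If Even number of columns ->
-- 		1. Make two identical rows of alternating player tokens from right to left.
-- 		2. Make two identical rows of alternating player tokens from left to right
-- 		3. Repeat until all rows filled
-- 	If Odd number columns ->
-- 		1. Fill all but one column using even number of columns strategy
-- 		2. Fill remaining column with alternating player tokens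
-- 	"""
-- 	even_game_board_width = game_board_width - (game_board_width % 2)
-- 	fill_row_left_right = lambda: list(range(1, even_game_board_width + 1))
-- 	fill_row_right_left = lambda: fill_row_left_right()[::-1]
-- 	game = []
-- 	for current_row_index in range(game_board_height):
-- 		new_row = fill_row_left_right() if current_row_index % 4 in [0,1] else fill_row_right_left()
-- 		game += new_row
-- 	if game_board_width % 2: # If odd number of columns
-- 		game += [game_board_width] * game_board_height
-- 	return game
-- ===== SOURCE B (Python) =====
-- from typing import List
--
-- def generate_draw_game(game_board_height: int, game_board_width: int) -> List[int]:
--     if game_board_height <= 0: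
--         return []
--     even = game_board_width - (game_board_width % 2)
--     forward = list(range(1, even + 1))
--     backward = forward[::-1]
--     tile = forward + forward + backward + backward  # 4 full rows
--     n = len(forward) * game_board_height
--     game = (tile * ((game_board_height + 3) // 4))[:n]
--     if game_board_width % 2:
--         game += [game_board_width] * game_board_height
--     return game
-- ===== Notes on version B (the rewrite author's own statement) =====
-- stated objective: simpler
-- what changed: Instead of looping over every row and choosing forward/backward per index, B builds one 4-row tile (forward+forward+backward+backward), repeats it ceil(height/4) times and slices the flat list to exactly len(forward)*height elements, then appends the odd column block.
import Mathlib
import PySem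

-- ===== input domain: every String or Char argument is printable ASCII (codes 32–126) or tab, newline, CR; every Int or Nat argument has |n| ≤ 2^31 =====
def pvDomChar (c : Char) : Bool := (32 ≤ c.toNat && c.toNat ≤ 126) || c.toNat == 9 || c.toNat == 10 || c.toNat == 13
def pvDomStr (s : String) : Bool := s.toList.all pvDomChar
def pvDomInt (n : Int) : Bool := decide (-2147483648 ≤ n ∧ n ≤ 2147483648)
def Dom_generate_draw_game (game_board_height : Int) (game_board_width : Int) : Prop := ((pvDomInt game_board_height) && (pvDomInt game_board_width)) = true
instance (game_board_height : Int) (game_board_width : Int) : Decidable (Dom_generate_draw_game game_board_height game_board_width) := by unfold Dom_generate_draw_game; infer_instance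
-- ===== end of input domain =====

-- B replaces A's per-row loop with one 4-row tile repeated and sliced to length (objective: simpler decomposition, not claimed faster).

-- ===== PORT A =====
def generate_draw_game (game_board_height : Int) (game_board_width : Int) : List Int :=
  let even_game_board_width := game_board_width - PySem.Int.mod game_board_width 2
  let fill_row_left_right := PySem.List.pyRange 1 (even_game_board_width + 1) 1
  -- fill_row_left_right()[::-1] is reverse (PySem.List.slice?_none_none_neg_one)
  let fill_row_right_left := fill_row_left_right.reverse
  let game := (PySem.List.pyRange 0 game_board_height 1).foldl
    (fun game i =>
      game ++ (if PySem.Int.mod i 4 = 0 ∨ PySem.Int.mod i 4 = 1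
               then fill_row_left_right else fill_row_right_left)) []
  if PySem.Int.mod game_board_width 2 ≠ 0 then
    game ++ PySem.List.pyRepeat [game_board_width] game_board_height
  else game

-- ===== PORT B =====
def generate_draw_game_alt (game_board_height : Int) (game_board_width : Int) : List Int :=
  if game_board_height ≤ 0 then []
  else
    let even := game_board_width - PySem.Int.mod game_board_width 2
    let forward := PySem.List.pyRange 1 (even + 1) 1
    let backward := forward.reverse
    let tile := forward ++ forward ++ backward ++ backward
    let n := (forward.length : Int) * game_board_height
    let game := PySem.List.slice
      (PySem.List.pyRepeat tile (PySem.Int.floordiv (game_board_height + 3) 4)) none (some n)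
    if PySem.Int.mod game_board_width 2 ≠ 0 then
      game ++ PySem.List.pyRepeat [game_board_width] game_board_height
    else game

-- ===== PRECONDITION & SPEC =====
def Spec_generate_draw_game (game_board_height : Int) (game_board_width : Int) (out : List Int) : Prop := out = generate_draw_game_alt game_board_height game_board_width
instance (game_board_height : Int) (game_board_width : Int) (out : List Int) : Decidable (Spec_generate_draw_game game_board_height game_board_width out) := by unfold Spec_generate_draw_game; infer_instance

-- ===== CLAIM (what is proved, stated in full; the proofs are below) =====
def Claim_equal_generate_draw_game : Prop := ∀ (game_board_height : Int) (game_board_width : Int), Dom_generate_draw_game game_board_height game_board_width → Spec_generate_draw_game game_board_height game_board_width (generate_draw_game game_board_height game_board_width)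

-- ===== LEMMAS AND PROOFS =====

-- the row used at (0-based) row index k, as both programs lay it down
def pvRow (f : List Int) (k : Nat) : List Int :=
  if k % 4 = 0 ∨ k % 4 = 1 then f else f.reverse

lemma pvRow_length (f : List Int) (k : Nat) : (pvRow f k).length = f.length := by
  unfold pvRow; split_ifs <;> simp

-- A's foldl over range(h) is the flatMap of pvRow over List.range
lemma pvA_core (f : List Int) (N : Nat) :
    (PySem.List.pyRange 0 (N : Int) 1).foldl
      (fun g i => g ++ (if PySem.Int.mod i 4 = 0 ∨ PySem.Int.mod i 4 = 1 then f else f.reverse)) []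
    = (List.range N).flatMap (pvRow f) := by
  rw [PySem.List.foldl_append_eq_flatMap, List.nil_append, PySem.List.pyRange_one]
  simp only [Int.sub_zero, Int.toNat_natCast, List.flatMap_map]
  apply List.flatMap_congr
  intro k _
  have : PySem.Int.mod ((0 : Int) + (k : Int)) 4 = ((k % 4 : Nat) : Int) := by
    rw [Int.zero_add]; exact_mod_cast PySem.Int.mod_natCast k 4
  rw [this]
  unfold pvRow
  split_ifs with h1 h2 h2 <;> first | rfl | (exfalso; omega)

-- the 4-row tile repeated R times is the first 4R rows
lemma pvTile_flatten (f : List Int) (R : Nat) :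
    (List.replicate R (f ++ f ++ f.reverse ++ f.reverse)).flatten
      = (List.range (4 * R)).flatMap (pvRow f) := by
  induction R with
  | zero => simp
  | succ R ih =>
    rw [List.replicate_succ', List.flatten_append]
    have h4 : 4 * (R + 1) = 4 * R + 4 := by ring
    rw [h4, List.range_add, List.flatMap_append, ih]
    congr 1
    have e : List.range 4 = [0, 1, 2, 3] := by decide
    simp only [e, List.map_cons, List.map_nil, List.flatMap_cons, List.flatMap_nil]
    have r0 : pvRow f (4 * R + 0) = f := by unfold pvRow; split_ifs with h <;> [rfl; (exfalso; omega)]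
    have r1 : pvRow f (4 * R + 1) = f := by unfold pvRow; split_ifs with h <;> [rfl; (exfalso; omega)]
    have r2 : pvRow f (4 * R + 2) = f.reverse := by unfold pvRow; split_ifs with h <;> [(exfalso; omega); rfl]
    have r3 : pvRow f (4 * R + 3) = f.reverse := by unfold pvRow; split_ifs with h <;> [(exfalso; omega); rfl]
    rw [r0, r1, r2, r3]
    simp [List.append_assoc]

lemma pvLen_flatMap (f : List Int) (N : Nat) :
    ((List.range N).flatMap (pvRow f)).length = N * f.length := by
  induction N with
  | zero => simp
  | succ N ih =>
    rw [List.range_succ, List.flatMap_append, List.length_append, ih]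
    simp [pvRow_length, Nat.succ_mul]

lemma pvTake_flatMap (f : List Int) (N M : Nat) (h : N ≤ M) :
    ((List.range M).flatMap (pvRow f)).take (N * f.length)
      = (List.range N).flatMap (pvRow f) := by
  obtain ⟨k, rfl⟩ : ∃ k, M = N + k := ⟨M - N, by omega⟩
  rw [List.range_add, List.flatMap_append, List.take_left' (pvLen_flatMap f N)]

-- ===== VERDICT (by name: the statement is the Claim_ definition above) =====
theorem generate_draw_game_spec : Claim_equal_generate_draw_game := by
  intro h w _
  unfold Spec_generate_draw_game
  by_cases hh : h ≤ 0
  · have hr : PySem.List.pyRange 0 h 1 = [] := PySem.List.pyRange_one_eq_nil hh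
    have ht : h.toNat = 0 := by omega
    simp [generate_draw_game, generate_draw_game_alt, hh, hr, PySem.List.pyRepeat, ht]
  · obtain ⟨N, rfl⟩ := Int.eq_ofNat_of_zero_le (by omega : (0 : Int) ≤ h)
    have hN : 0 < N := by omega
    simp only [generate_draw_game, generate_draw_game_alt, if_neg hh]
    set f := PySem.List.pyRange 1 (w - PySem.Int.mod w 2 + 1) 1 with hf
    have key :
        (PySem.List.pyRange 0 (N : Int) 1).foldl
          (fun g i => g ++ (if PySem.Int.mod i 4 = 0 ∨ PySem.Int.mod i 4 = 1 then f else f.reverse)) []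
        = PySem.List.slice
            (PySem.List.pyRepeat (f ++ f ++ f.reverse ++ f.reverse)
              (PySem.Int.floordiv ((N : Int) + 3) 4))
            none (some ((f.length : Int) * (N : Int))) := by
      have hdiv : PySem.Int.floordiv ((N : Int) + 3) 4 = (((N + 3) / 4 : Nat) : Int) := by
        have : ((N : Int) + 3) = (((N + 3 : Nat)) : Int) := by push_cast; ring
        rw [this]
        exact_mod_cast PySem.Int.floordiv_natCast (N + 3) 4
      have hcast : ((f.length : Int) * (N : Int)) = (((f.length * N : Nat)) : Int) := by push_cast; ring
      rw [hdiv, hcast, PySem.List.slice_to _ (Int.natCast_nonneg _), Int.toNat_natCast,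
        PySem.List.pyRepeat, Int.toNat_natCast, pvTile_flatten, pvA_core,
        Nat.mul_comm f.length N, pvTake_flatMap f N (4 * ((N + 3) / 4)) (by omega)]
    rw [key]
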